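-- pv_equiv track=rewrite | github.com/wanghaisheng/auto-submit-site-domain | namecheap_fetcher.py | filter_domains
-- ===== SOURCE A (Python) =====
-- def filter_domains(domains, config):
--     """Apply whitelist and blacklist filtering to domains"""
--     whitelist = config.get("domain_whitelist", [])
--     blacklist = config.get("domain_blacklist", [])
--
--     # Apply whitelist if it exists
--     if whitelist:
--         domains = [domain for domain in domains if any(domain.endswith(wl) for wl in whitelist)]
--
--     # Apply blacklist
--     if blacklist:
--         domains = [domain for domain in domains if not any(domain.endswith(bl) for bl in blacklist)]
--
--     return domains
-- ===== SOURCE B (Python) =====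
-- def filter_domains(domains, config):
--     """Apply whitelist and blacklist filtering to domains.
--
--     Pattern-major strategy: for each whitelist/blacklist pattern, collect the
--     matching domains into a set up front; then emit domains (in order) by set
--     membership, instead of testing every pattern per domain in staged passes.
--     """
--     whitelist = config.get("domain_whitelist", [])
--     blacklist = config.get("domain_blacklist", [])
--
--     allowed = set()
--     for wl in whitelist:
--         for d in domains:
--             if d.endswith(wl):
--                 allowed.add(d)
--
--     blocked = set()
--     for bl in blacklist:
--         for d in domains:
--             if d.endswith(bl):
--                 blocked.add(d)
--
--     out = []
--     for d in domains:
--         if (not whitelist or d in allowed) and d not in blocked: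
--             out.append(d)
--     return out
-- ===== Notes on version B (the rewrite author's own statement) =====
-- stated objective: alternative
-- what changed: Inverts the loop nesting: instead of A's two staged domain-major comprehensions testing every pattern per domain, B iterates pattern-major, precomputing an 'allowed' and a 'blocked' set of matching domains, then emits the output in one ordered pass by set membership.
import Mathlib
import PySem

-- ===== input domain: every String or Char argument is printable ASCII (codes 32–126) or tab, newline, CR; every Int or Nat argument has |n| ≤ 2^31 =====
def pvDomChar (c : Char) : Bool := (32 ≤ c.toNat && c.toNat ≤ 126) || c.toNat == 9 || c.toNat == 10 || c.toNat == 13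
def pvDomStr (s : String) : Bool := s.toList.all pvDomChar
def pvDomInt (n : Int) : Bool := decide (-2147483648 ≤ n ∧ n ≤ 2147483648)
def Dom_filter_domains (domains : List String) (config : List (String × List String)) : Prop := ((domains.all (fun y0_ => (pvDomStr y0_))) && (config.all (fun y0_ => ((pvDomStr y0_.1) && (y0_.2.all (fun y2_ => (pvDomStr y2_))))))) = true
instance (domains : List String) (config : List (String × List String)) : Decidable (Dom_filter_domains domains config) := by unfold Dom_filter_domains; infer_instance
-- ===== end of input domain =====

-- B inverts the loop nesting: pattern-major precomputed allowed/blocked match sets, then one ordered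
-- output pass by set membership, instead of A's staged domain-major filtering passes (objective: alternative).

-- ===== PORT A =====
def filter_domains (domains : List String) (config : List (String × List String)) : List String :=
  let whitelist := PySem.Dict.getD (PySem.Dict.mk config) "domain_whitelist" []
  let blacklist := PySem.Dict.getD (PySem.Dict.mk config) "domain_blacklist" []
  let domains1 :=
    if whitelist ≠ [] then
      domains.filter (fun domain => whitelist.any (fun wl => PySem.Str.endswith domain wl))
    else domains
  let domains2 :=
    if blacklist ≠ [] then
      domains1.filter (fun domain => !(blacklist.any (fun bl => PySem.Str.endswith domain bl)))
    else domains1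
  domains2

-- ===== PORT B =====
def filter_domains_alt (domains : List String) (config : List (String × List String)) : List String :=
  let whitelist := PySem.Dict.getD (PySem.Dict.mk config) "domain_whitelist" []
  let blacklist := PySem.Dict.getD (PySem.Dict.mk config) "domain_blacklist" []
  let allowed : PySem.Set String :=
    whitelist.foldl (fun s wl =>
      domains.foldl (fun s d => if PySem.Str.endswith d wl then PySem.Set.add s d else s) s)
      PySem.Set.empty
  let blocked : PySem.Set String :=
    blacklist.foldl (fun s bl =>
      domains.foldl (fun s d => if PySem.Str.endswith d bl then PySem.Set.add s d else s) s)
      PySem.Set.empty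
  domains.foldl (fun out d =>
    if (whitelist.isEmpty || PySem.Set.contains allowed d) && !(PySem.Set.contains blocked d)
    then out ++ [d] else out) []

-- ===== PRECONDITION & SPEC =====
def Spec_filter_domains (domains : List String) (config : List (String × List String)) (out : List String) : Prop := out = filter_domains_alt domains config
instance (domains : List String) (config : List (String × List String)) (out : List String) : Decidable (Spec_filter_domains domains config out) := by unfold Spec_filter_domains; infer_instance

-- ===== CLAIM =====
def Claim_equal_filter_domains : Prop := ∀ (domains : List String) (config : List (String × List String)), Dom_filter_domains domains config → Spec_filter_domains domains config (filter_domains domains config)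

-- ===== LEMMAS AND PROOFS =====

-- membership in the inner pattern pass: d ends up in the set iff it was there or matches p and occurs in l
theorem mem_foldl_addIf (p : String → Bool) (l : List String) (s0 : PySem.Set String) (d : String) :
    d ∈ l.foldl (fun s x => if p x then PySem.Set.add s x else s) s0 ↔
      d ∈ s0 ∨ (d ∈ l ∧ p d = true) := by
  induction l generalizing s0 with
  | nil => simp
  | cons x t ih =>
    simp only [List.foldl_cons, ih]
    by_cases h : p x = true
    · simp [h, PySem.Set.mem_add]
      constructor
      · rintro (⟨hs | rfl⟩ | ⟨ht, hp⟩)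
        · exact Or.inl hs
        · exact Or.inr ⟨Or.inl rfl, h⟩
        · exact Or.inr ⟨Or.inr ht, hp⟩
      · rintro (hs | ⟨(rfl | ht), hp⟩)
        · exact Or.inl (Or.inl hs)
        · exact Or.inl (Or.inr rfl)
        · exact Or.inr ⟨ht, hp⟩
    · simp only [if_neg h]
      constructor
      · rintro (hs | ⟨ht, hp⟩)
        · exact Or.inl hs
        · exact Or.inr ⟨List.mem_cons_of_mem _ ht, hp⟩
      · rintro (hs | ⟨hm, hp⟩)
        · exact Or.inl hs
        · rcases List.mem_cons.mp hm with rfl | ht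
          · exact absurd hp h
          · exact Or.inr ⟨ht, hp⟩

-- membership in the full pattern-major double fold
theorem mem_matchSet (pats domains : List String) (s0 : PySem.Set String) (d : String) :
    d ∈ pats.foldl (fun s wl =>
        domains.foldl (fun s x => if PySem.Str.endswith x wl then PySem.Set.add s x else s) s) s0 ↔
      d ∈ s0 ∨ (d ∈ domains ∧ pats.any (fun wl => PySem.Str.endswith d wl) = true) := by
  induction pats generalizing s0 with
  | nil => simp
  | cons w t ih =>
    simp only [List.foldl_cons, ih, mem_foldl_addIf, List.any_cons, Bool.or_eq_true]
    tauto

-- for d drawn from domains, set membership is exactly the any-pattern test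
theorem contains_matchSet (pats domains : List String) (d : String) (hd : d ∈ domains) :
    PySem.Set.contains
      (pats.foldl (fun s wl =>
        domains.foldl (fun s x => if PySem.Str.endswith x wl then PySem.Set.add s x else s) s)
        PySem.Set.empty) d
      = pats.any (fun wl => PySem.Str.endswith d wl) := by
  rw [Bool.eq_iff_iff, PySem.Set.contains_iff, mem_matchSet]
  simp [PySem.Set.empty, hd]

-- B computes the single-pass combined filter
theorem alt_eq_filter (domains : List String) (config : List (String × List String)) :
    filter_domains_alt domains config =
      domains.filter (fun d =>
        ((PySem.Dict.getD (PySem.Dict.mk config) "domain_whitelist" []).isEmpty ||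
          (PySem.Dict.getD (PySem.Dict.mk config) "domain_whitelist" []).any
            (fun wl => PySem.Str.endswith d wl))
        && !((PySem.Dict.getD (PySem.Dict.mk config) "domain_blacklist" []).any
            (fun bl => PySem.Str.endswith d bl))) := by
  unfold filter_domains_alt
  rw [PySem.List.foldl_append_if_eq_filter]
  rw [List.nil_append]
  apply List.filter_congr
  intro d hd
  rw [contains_matchSet _ _ _ hd, contains_matchSet _ _ _ hd]

theorem filter_domains_eq (domains : List String) (config : List (String × List String)) :
    filter_domains domains config = filter_domains_alt domains config := by
  rw [alt_eq_filter]
  unfold filter_domains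
  set wl := PySem.Dict.getD (PySem.Dict.mk config) "domain_whitelist" [] with hwl
  set bl := PySem.Dict.getD (PySem.Dict.mk config) "domain_blacklist" [] with hbl
  rcases wl with _ | ⟨w, ws⟩ <;> rcases bl with _ | ⟨b, bs⟩ <;>
    simp [List.filter_filter, Bool.and_comm]

-- ===== VERDICT =====
theorem filter_domains_spec : Claim_equal_filter_domains := by
  intro domains config _
  exact (filter_domains_eq domains config)
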